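-- pv_equiv track=rewrite | github.com/MarkMLCode/Dungeons-and-Zero | src/ai/dnd_server.py | recover_spell_slots_arcane_recovery
-- ===== SOURCE A (Python) =====
-- from typing import Tuple, Any
--
-- def recover_spell_slots_arcane_recovery(spell_slots, spells_per_day, wizard_level) -> Tuple[Any, Any]:
--     total_value_recovered = 0
--     recovered_slots_per_level = [0] * 8
--
--     # Level 8 to 1
--     for level in range(8, 0, -1):
--         # Loop while there's still slots that can be recoved at this level
--         while total_value_recovered + level <= wizard_level and spell_slots[level - 1] < spells_per_day[level - 1]:
--             spell_slots[level - 1] += 1  # Recover one slot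
--             recovered_slots_per_level[level - 1] += 1  # Record the recovery
--             total_value_recovered += level  # Update the total value of recovered slots
--
--             # Break out of the loop if adding another slot of this level would exceed the wizard's level
--             if total_value_recovered + level > wizard_level:
--                 break
--
--     # Check if we managed to recover enough slots
--     if total_value_recovered < wizard_level // 2:
--         return None, None
--
--     # Loop through the recovered spell slots and write a text for each level
--     recovery_phrases = []
--     for level, count in enumerate(recovered_slots_per_level[::-1], 1):
--         if count > 0:  #
--             recovery_phrases.append(f"{count} level {9 - level}")
--
--     recovery_text = "Recovered the following spell slots using arcane recovery: " + ", ".join(recovery_phrases) + "."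
--     return spell_slots, recovery_text
-- ===== SOURCE B (Python) =====
-- def recover_spell_slots_arcane_recovery(spell_slots, spells_per_day, wizard_level):
--     recovered = [0] * 8
--     remaining = wizard_level
--     for level in range(8, 0, -1):
--         if remaining >= level:
--             deficit = spells_per_day[level - 1] - spell_slots[level - 1]
--             if deficit > 0:
--                 n = min(deficit, remaining // level)
--                 spell_slots[level - 1] += n
--                 recovered[level - 1] = n
--                 remaining -= n * level
--     if wizard_level - remaining < wizard_level // 2:
--         return None, None
--     phrases = [f"{recovered[level - 1]} level {level}"
--                for level in range(8, 0, -1) if recovered[level - 1] > 0]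
--     return spell_slots, ("Recovered the following spell slots using arcane recovery: "
--                          + ", ".join(phrases) + ".")
-- ===== Notes on version B (the rewrite author's own statement) =====
-- stated objective: alternative
-- what changed: The inner while loop that recovers one slot at a time is replaced by a per-level closed form: n = min(deficit, remaining // level) slots are recovered at once by floor division, so each of the 8 levels is handled in O(1) instead of one iteration per recovered slot.
import Mathlib
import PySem

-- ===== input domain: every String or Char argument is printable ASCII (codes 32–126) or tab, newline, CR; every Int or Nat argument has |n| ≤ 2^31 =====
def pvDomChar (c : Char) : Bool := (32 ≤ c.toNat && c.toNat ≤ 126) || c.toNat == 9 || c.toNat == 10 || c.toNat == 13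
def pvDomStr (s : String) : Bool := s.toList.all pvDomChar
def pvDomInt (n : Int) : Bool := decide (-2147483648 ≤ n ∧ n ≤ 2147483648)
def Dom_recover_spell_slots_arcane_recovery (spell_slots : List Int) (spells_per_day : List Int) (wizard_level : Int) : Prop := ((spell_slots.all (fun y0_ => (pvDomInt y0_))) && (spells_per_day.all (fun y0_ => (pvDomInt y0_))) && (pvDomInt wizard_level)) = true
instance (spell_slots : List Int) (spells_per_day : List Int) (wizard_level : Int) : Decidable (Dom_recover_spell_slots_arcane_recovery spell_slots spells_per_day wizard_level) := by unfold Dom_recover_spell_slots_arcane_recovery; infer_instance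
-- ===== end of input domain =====

-- B replaces A's one-slot-at-a-time inner while loop by a per-level floor-division
-- closed form (a different algorithm; not measurably faster on a timing run's
-- inputs). Both Pythons mutate the list spell_slots in place in the same way; the
-- equivalence proved here is about the RETURN value.

-- ===== PORT A =====
-- the inner 'while' loop of A at one spell level; fuel bounds the iteration count
-- (each iteration adds level ≥ 1 to total and requires total + level ≤ wl)
def pvWhileA (spd : List Int) (wl level : Int) : Nat → List Int × List Int × Int → List Int × List Int × Int
  | 0, st => st
  | fuel + 1, (ss, rec, total) =>
    if total + level ≤ wl then
      match PySem.List.pyGet? ss (level - 1), PySem.List.pyGet? spd (level - 1) with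
      | some a, some b =>
        if a < b then
          let ss' := PySem.List.pySetD ss (level - 1) (a + 1)
          let rec' := PySem.List.pySetD rec (level - 1) (PySem.List.pyGetD rec (level - 1) 0 + 1)
          let total' := total + level
          if wl < total' + level then (ss', rec', total')
          else pvWhileA spd wl level fuel (ss', rec', total')
        else (ss, rec, total)
      | _, _ => (ss, rec, total)
    else (ss, rec, total)

def recover_spell_slots_arcane_recovery (spell_slots : List Int) (spells_per_day : List Int) (wizard_level : Int) : Option (List Int) × Option String :=
  let st := (PySem.List.pyRange 8 0 (-1)).foldl
    (fun st level => pvWhileA spells_per_day wizard_level level (wizard_level.toNat + 1) st)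
    (spell_slots, PySem.List.pyRepeat [0] 8, 0)
  if st.2.2 < PySem.Int.floordiv wizard_level 2 then (none, none)
  else
    -- recovered[::-1] is List.reverse (PySem.List.slice?_none_none_neg_one)
    let phrases := (PySem.List.enumerate st.2.1.reverse 1).foldl
      (fun acc p => if 0 < p.2 then acc ++ [PySem.Int.toStr p.2 ++ " level " ++ PySem.Int.toStr (9 - p.1)] else acc) []
    (some st.1, some ("Recovered the following spell slots using arcane recovery: " ++ PySem.Str.join ", " phrases ++ "."))

-- ===== PORT B =====
-- one level of B: recover min(deficit, remaining // level) slots at once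
def pvLevelB (spd : List Int) (level : Int) (st : List Int × List Int × Int) : List Int × List Int × Int :=
  if level ≤ st.2.2 then
    match PySem.List.pyGet? st.1 (level - 1), PySem.List.pyGet? spd (level - 1) with
    | some a, some b =>
      if 0 < b - a then
        let n := min (b - a) (PySem.Int.floordiv st.2.2 level)
        (PySem.List.pySetD st.1 (level - 1) (a + n), PySem.List.pySetD st.2.1 (level - 1) n, st.2.2 - n * level)
      else st
    | _, _ => st
  else st

def recover_spell_slots_arcane_recovery_alt (spell_slots : List Int) (spells_per_day : List Int) (wizard_level : Int) : Option (List Int) × Option String :=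
  let st := (PySem.List.pyRange 8 0 (-1)).foldl
    (fun st level => pvLevelB spells_per_day level st)
    (spell_slots, PySem.List.pyRepeat [0] 8, wizard_level)
  if wizard_level - st.2.2 < PySem.Int.floordiv wizard_level 2 then (none, none)
  else
    let phrases := ((PySem.List.pyRange 8 0 (-1)).filter
        (fun level => decide (0 < PySem.List.pyGetD st.2.1 (level - 1) 0))).map
      (fun level => PySem.Int.toStr (PySem.List.pyGetD st.2.1 (level - 1) 0) ++ " level " ++ PySem.Int.toStr level)
    (some st.1, some ("Recovered the following spell slots using arcane recovery: " ++ PySem.Str.join ", " phrases ++ "."))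

-- ===== PRECONDITION & SPEC =====
-- Pre_ excludes exactly the inputs where Python A raises IndexError: when
-- wizard_level ≥ 1, level min(8, wizard_level) is the first (largest) index accessed,
-- so both lists must have at least min(8, wizard_level) elements.
def Pre_recover_spell_slots_arcane_recovery (spell_slots : List Int) (spells_per_day : List Int) (wizard_level : Int) : Prop :=
  wizard_level ≤ 0 ∨ (min 8 wizard_level ≤ (spell_slots.length : Int) ∧ min 8 wizard_level ≤ (spells_per_day.length : Int))
instance (spell_slots : List Int) (spells_per_day : List Int) (wizard_level : Int) : Decidable (Pre_recover_spell_slots_arcane_recovery spell_slots spells_per_day wizard_level) := by unfold Pre_recover_spell_slots_arcane_recovery; infer_instance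
def pvWitness_recover_spell_slots_arcane_recovery : List Int × List Int × Int := ([1, 1, 1, 0, 0, 0, 0, 0], [2, 2, 2, 1, 0, 0, 0, 0], 5)

def Spec_recover_spell_slots_arcane_recovery (spell_slots : List Int) (spells_per_day : List Int) (wizard_level : Int) (out : Option (List Int) × Option String) : Prop := out = recover_spell_slots_arcane_recovery_alt spell_slots spells_per_day wizard_level
instance (spell_slots : List Int) (spells_per_day : List Int) (wizard_level : Int) (out : Option (List Int) × Option String) : Decidable (Spec_recover_spell_slots_arcane_recovery spell_slots spells_per_day wizard_level out) := by unfold Spec_recover_spell_slots_arcane_recovery; infer_instance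

-- ===== CLAIM (what is proved, stated in full; the proofs are below) =====
def Claim_equal_recover_spell_slots_arcane_recovery : Prop := ∀ (spell_slots : List Int) (spells_per_day : List Int) (wizard_level : Int), Dom_recover_spell_slots_arcane_recovery spell_slots spells_per_day wizard_level → Pre_recover_spell_slots_arcane_recovery spell_slots spells_per_day wizard_level → Spec_recover_spell_slots_arcane_recovery spell_slots spells_per_day wizard_level (recover_spell_slots_arcane_recovery spell_slots spells_per_day wizard_level)

-- ===== LEMMAS AND PROOFS =====

theorem pvWhileA_char (spd : List Int) (wl level : Int) (fuel : Nat) :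
    ∀ (ss rec : List Int) (total a b : Int),
    1 ≤ level → total + level ≤ wl →
    PySem.List.pyGet? ss (level - 1) = some a →
    PySem.List.pyGet? spd (level - 1) = some b →
    (level - 1).toNat < rec.length →
    wl - total < (fuel : Int) →
    pvWhileA spd wl level fuel (ss, rec, total) =
      (PySem.List.pySetD ss (level - 1) (a + max 0 (min (b - a) (PySem.Int.floordiv (wl - total) level))),
       PySem.List.pySetD rec (level - 1) (PySem.List.pyGetD rec (level - 1) 0 + max 0 (min (b - a) (PySem.Int.floordiv (wl - total) level))),
       total + max 0 (min (b - a) (PySem.Int.floordiv (wl - total) level)) * level) := by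
  induction fuel with
  | zero => intro ss rec total a b hlev hg ha hb hrec hfuel; exfalso; simp at hfuel; omega
  | succ fuel ih =>
    intro ss rec total a b hlev hg ha hb hrec hfuel
    have hknat : level - 1 = (((level-1).toNat : Nat) : Int) := by omega
    have hss : (level - 1).toNat < ss.length := by
      by_contra hcon
      rw [PySem.List.pyGet?_of_nonneg ss (by omega)] at ha
      rw [List.getElem?_eq_none (by omega)] at ha; simp at ha
    have haE : ss[(level-1).toNat]? = some a := by
      rw [← PySem.List.pyGet?_of_nonneg ss (by omega)]; exact ha
    have hr0 : PySem.List.pyGetD rec (level - 1) 0 = rec[(level-1).toNat]'hrec := by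
      rw [PySem.List.pyGetD_eq_getElem rec 0 (by omega) (by omega)]
    have hq1 : 1 ≤ PySem.Int.floordiv (wl - total) level := by
      rw [PySem.Int.le_floordiv_iff_mul_le (by omega)]; omega
    rw [pvWhileA]
    rw [if_pos hg, ha, hb]
    simp only
    by_cases hab : a < b
    · rw [if_pos hab]
      by_cases hbrk : wl < total + level + level
      · rw [if_pos hbrk]
        have hq : PySem.Int.floordiv (wl - total) level = 1 := by
          rw [PySem.Int.floordiv_eq_iff_of_pos (by omega)]; constructor <;> omega
        rw [hq]
        have hm : max 0 (min (b - a) 1) = 1 := by omega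
        rw [hm]
        refine Prod.ext ?_ (Prod.ext ?_ ?_) <;> simp
      · rw [if_neg hbrk]
        have hq2 : 2 ≤ PySem.Int.floordiv (wl - total) level := by
          rw [PySem.Int.le_floordiv_iff_mul_le (by omega)]; omega
        have hqstep : PySem.Int.floordiv (wl - (total + level)) level
            = PySem.Int.floordiv (wl - total) level - 1 := by
          rw [PySem.Int.floordiv_eq_ediv_of_pos (show (0:Int) < level by omega),
              PySem.Int.floordiv_eq_ediv_of_pos (show (0:Int) < level by omega)]
          have := Int.add_mul_ediv_right (wl - total) (-1) (by omega : level ≠ 0)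
          have e : wl - (total + level) = wl - total + -1 * level := by ring
          rw [e, this]; ring
        have ha' : PySem.List.pyGet? (PySem.List.pySetD ss (level - 1) (a + 1)) (level - 1) = some (a + 1) := by
          rw [PySem.List.pySetD_of_nonneg ss (a+1) (by omega),
              PySem.List.pyGet?_of_nonneg _ (by omega), List.getElem?_set_self hss]
        have hrec' : (level - 1).toNat < (PySem.List.pySetD rec (level - 1) (PySem.List.pyGetD rec (level - 1) 0 + 1)).length := by
          rw [PySem.List.pySetD_of_nonneg rec _ (by omega), List.length_set]; exact hrec
        rw [ih _ _ _ _ _ hlev (by omega) ha' hb hrec' (by omega)]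
        have hr0' : PySem.List.pyGetD (PySem.List.pySetD rec (level - 1) (PySem.List.pyGetD rec (level - 1) 0 + 1)) (level - 1) 0
            = PySem.List.pyGetD rec (level - 1) 0 + 1 := by
          rw [PySem.List.pySetD_of_nonneg rec _ (by omega),
              PySem.List.pyGetD_eq_getElem _ 0 (by omega) (by rw [List.length_set]; omega),
              List.getElem_set_self (by rw [List.length_set]; exact hrec)]
        rw [hr0', hqstep]
        have hn : max 0 (min (b - (a + 1)) (PySem.Int.floordiv (wl - total) level - 1))
            = max 0 (min (b - a) (PySem.Int.floordiv (wl - total) level)) - 1 := by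
          have hmin : (1:Int) ≤ min (b - a) (PySem.Int.floordiv (wl - total) level) :=
            le_min (by omega) (by omega)
          have e1 : b - (a + 1) = b - a - 1 := by ring
          rw [e1, min_sub_sub_right, max_eq_right (by linarith), max_eq_right (by linarith)]
        rw [hn]
        rw [PySem.List.pySetD_of_nonneg ss (a+1) (by omega),
            PySem.List.pySetD_of_nonneg (ss.set (level-1).toNat (a+1)) _ (by omega),
            PySem.List.pySetD_of_nonneg ss _ (by omega),
            List.set_set,
            PySem.List.pySetD_of_nonneg rec _ (by omega),
            PySem.List.pySetD_of_nonneg (rec.set (level-1).toNat (PySem.List.pyGetD rec (level - 1) 0 + 1)) _ (by omega),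
            PySem.List.pySetD_of_nonneg rec _ (by omega),
            List.set_set]
        generalize max 0 (min (b - a) (PySem.Int.floordiv (wl - total) level)) = N
        have e2 : a + 1 + (N - 1) = a + N := by omega
        have e3 : PySem.List.pyGetD rec (level - 1) 0 + 1 + (N - 1)
            = PySem.List.pyGetD rec (level - 1) 0 + N := by omega
        have e4 : total + level + (N - 1) * level = total + N * level := by ring
        rw [e2, e3, e4]
    · rw [if_neg hab]
      have hn : max 0 (min (b - a) (PySem.Int.floordiv (wl - total) level)) = 0 := by omega
      rw [hn]
      have haEq : ss[(level-1).toNat]'hss = a := by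
        have h2 := List.getElem?_eq_getElem (l := ss) hss
        rw [haE] at h2; injection h2.symm
      refine Prod.ext ?_ (Prod.ext ?_ ?_) <;> simp
      · rw [PySem.List.pySetD_of_nonneg ss _ (by omega),
          show a = ss[(level-1).toNat]'hss from haEq.symm]
        exact (List.set_getElem_self hss).symm
      · rw [PySem.List.pySetD_of_nonneg rec _ (by omega), hr0]
        exact (List.set_getElem_self hrec).symm

theorem level_eq (spd ss rec : List Int) (wl level total : Int) (fuel : Nat)
    (hlev : 1 ≤ level) (hrec : (level - 1).toNat < rec.length)
    (h0 : PySem.List.pyGetD rec (level - 1) 0 = 0)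
    (hfuel : wl - total < (fuel : Int)) :
    pvWhileA spd wl level fuel (ss, rec, total) =
      ((pvLevelB spd level (ss, rec, wl - total)).1,
       (pvLevelB spd level (ss, rec, wl - total)).2.1,
       wl - (pvLevelB spd level (ss, rec, wl - total)).2.2) := by
  by_cases hg : total + level ≤ wl
  · -- the level is affordable; both sides look at the two lists
    have hfe : ∃ f, fuel = f + 1 := ⟨fuel - 1, by omega⟩
    obtain ⟨f, rfl⟩ := hfe
    unfold pvLevelB
    rw [if_pos (by simp; omega)]
    simp only
    rcases ha : PySem.List.pyGet? ss (level - 1) with _ | a <;>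
      rcases hb : PySem.List.pyGet? spd (level - 1) with _ | b
    · rw [pvWhileA, if_pos hg, ha]; simp only
      rw [show wl - (wl - total) = total by omega]
    · rw [pvWhileA, if_pos hg, ha]; simp only
      rw [show wl - (wl - total) = total by omega]
    · rw [pvWhileA, if_pos hg, ha, hb]; simp only
      rw [show wl - (wl - total) = total by omega]
    · rw [pvWhileA_char spd wl level (f+1) ss rec total a b hlev hg ha hb hrec hfuel]
      simp only
      by_cases hab : 0 < b - a
      · rw [if_pos hab]
        have hq1 : 1 ≤ PySem.Int.floordiv (wl - total) level := by
          rw [PySem.Int.le_floordiv_iff_mul_le (by omega)]; omega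
        have hmin : (1:Int) ≤ min (b - a) (PySem.Int.floordiv (wl - total) level) :=
          le_min (by omega) (by omega)
        rw [max_eq_right (by linarith), h0]
        refine Prod.ext rfl (Prod.ext ?_ ?_)
        · simp
        · simp only
          ring_nf
      · rw [if_neg hab]
        have hn : max 0 (min (b - a) (PySem.Int.floordiv (wl - total) level)) = 0 := by
          have hq1 : 1 ≤ PySem.Int.floordiv (wl - total) level := by
            rw [PySem.Int.le_floordiv_iff_mul_le (by omega)]; omega
          have : min (b - a) (PySem.Int.floordiv (wl - total) level) ≤ b - a := min_le_left _ _
          have h2 : min (b - a) (PySem.Int.floordiv (wl - total) level) = b - a :=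
            min_eq_left (by omega)
          omega
        rw [hn]
        have hss : (level - 1).toNat < ss.length := by
          by_contra hcon
          rw [PySem.List.pyGet?_of_nonneg ss (by omega)] at ha
          rw [List.getElem?_eq_none (by omega)] at ha; simp at ha
        have haEq : ss[(level-1).toNat]'hss = a := by
          have h2 := List.getElem?_eq_getElem (l := ss) hss
          rw [← PySem.List.pyGet?_of_nonneg ss (by omega), ha] at h2
          injection h2.symm
        have hr0 : PySem.List.pyGetD rec (level - 1) 0 = rec[(level-1).toNat]'hrec := by
          rw [PySem.List.pyGetD_eq_getElem rec 0 (by omega) (by omega)]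
        refine Prod.ext ?_ (Prod.ext ?_ ?_) <;> simp
        · rw [PySem.List.pySetD_of_nonneg ss _ (by omega),
            show a = ss[(level-1).toNat]'hss from haEq.symm]
          exact List.set_getElem_self hss
        · rw [PySem.List.pySetD_of_nonneg rec _ (by omega), h0,
            show (0:Int) = rec[(level-1).toNat]'hrec from by rw [← hr0, h0]]
          exact List.set_getElem_self hrec
  · -- level too expensive: both sides do nothing
    unfold pvLevelB
    rw [if_neg (by simp; omega)]
    cases fuel with
    | zero => rw [pvWhileA]; simp
    | succ f => rw [pvWhileA, if_neg hg]; simp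

theorem levelB_rem_le (spd : List Int) (level : Int) (st : List Int × List Int × Int)
    (hlev : 1 ≤ level) : (pvLevelB spd level st).2.2 ≤ st.2.2 := by
  unfold pvLevelB
  split
  · rename_i hle
    rcases h1 : PySem.List.pyGet? st.1 (level - 1) with _ | a <;>
      rcases h2 : PySem.List.pyGet? spd (level - 1) with _ | b <;> simp
    split
    · rename_i hdef
      have hq : 1 ≤ PySem.Int.floordiv st.2.2 level := by
        rw [PySem.Int.le_floordiv_iff_mul_le (by omega)]; omega
      have hm : (1:Int) ≤ min (b - a) (PySem.Int.floordiv st.2.2 level) :=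
        le_min (by omega) (by omega)
      nlinarith [hm, hlev]
    · simp
  · simp

theorem levelB_rec_length (spd : List Int) (level : Int) (st : List Int × List Int × Int) :
    (pvLevelB spd level st).2.1.length = st.2.1.length := by
  unfold pvLevelB
  split
  · rcases h1 : PySem.List.pyGet? st.1 (level - 1) with _ | a <;>
      rcases h2 : PySem.List.pyGet? spd (level - 1) with _ | b <;> simp
    split
    · simp [PySem.List.length_pySetD]
    · simp
  · simp

theorem levelB_rec_other (spd : List Int) (level M : Int) (st : List Int × List Int × Int)
    (hM : 1 ≤ M) (hlev : 1 ≤ level) (hne : M ≠ level) :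
    PySem.List.pyGetD (pvLevelB spd level st).2.1 (M - 1) 0 = PySem.List.pyGetD st.2.1 (M - 1) 0 := by
  unfold pvLevelB
  split
  · rcases h1 : PySem.List.pyGet? st.1 (level - 1) with _ | a <;>
      rcases h2 : PySem.List.pyGet? spd (level - 1) with _ | b <;> simp
    split
    · rw [PySem.List.pySetD_of_nonneg st.2.1 _ (by omega)]
      rcases le_or_gt st.2.1.length (level - 1).toNat with h | h
      · rw [List.set_eq_of_length_le h]
      · rw [show M - 1 = (((M-1).toNat : Nat) : Int) by omega,
          PySem.List.pyGetD_natCast, PySem.List.pyGetD_natCast,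
          List.getD_eq_getElem?_getD, List.getD_eq_getElem?_getD,
          List.getElem?_set_ne (by omega)]
    · simp
  · simp

theorem foldB_rec_length (spd : List Int) (ls : List Int) (st : List Int × List Int × Int) :
    ((ls.foldl (fun st lv => pvLevelB spd lv st) st)).2.1.length = st.2.1.length := by
  induction ls generalizing st with
  | nil => rfl
  | cons L ls ih => rw [List.foldl_cons, ih, levelB_rec_length]

theorem fold_eq (spd : List Int) (wl : Int) (ls : List Int) (ss rec : List Int) (total : Int)
    (htot : 0 ≤ total)
    (hls : ∀ L ∈ ls, 1 ≤ L)
    (hnd : ls.Pairwise (· ≠ ·))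
    (hrec : ∀ L ∈ ls, (L - 1).toNat < rec.length ∧ PySem.List.pyGetD rec (L - 1) 0 = 0) :
    ls.foldl (fun st lv => pvWhileA spd wl lv (wl.toNat + 1) st) (ss, rec, total)
      = ((ls.foldl (fun st lv => pvLevelB spd lv st) (ss, rec, wl - total)).1,
         (ls.foldl (fun st lv => pvLevelB spd lv st) (ss, rec, wl - total)).2.1,
         wl - (ls.foldl (fun st lv => pvLevelB spd lv st) (ss, rec, wl - total)).2.2) := by
  induction ls generalizing ss rec total with
  | nil => simp
  | cons L ls ih =>
    have hL : 1 ≤ L := hls L (by simp)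
    obtain ⟨hrL, h0L⟩ := hrec L (by simp)
    rw [List.foldl_cons, List.foldl_cons]
    rw [level_eq spd ss rec wl L total (wl.toNat + 1) hL hrL h0L
        (by have := Int.self_le_toNat wl; push_cast; omega)]
    set B1 := pvLevelB spd L (ss, rec, wl - total) with hB1
    have hrem : B1.2.2 ≤ wl - total := levelB_rem_le spd L (ss, rec, wl - total) hL
    have htot' : 0 ≤ wl - B1.2.2 := by omega
    have hrec' : ∀ M ∈ ls, (M - 1).toNat < B1.2.1.length ∧ PySem.List.pyGetD B1.2.1 (M - 1) 0 = 0 := by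
      intro M hM
      obtain ⟨hr1, hr2⟩ := hrec M (by simp [hM])
      refine ⟨by rw [levelB_rec_length]; exact hr1, ?_⟩
      rw [levelB_rec_other spd L M (ss, rec, wl - total) (hls M (by simp [hM])) hL
          (by have := (List.pairwise_cons.mp hnd).1 M hM; exact fun h => this h.symm)]
      exact hr2
    rw [ih B1.1 B1.2.1 (wl - B1.2.2) htot' (fun M hM => hls M (by simp [hM]))
        (List.pairwise_cons.mp hnd).2 hrec']
    rw [show wl - (wl - B1.2.2) = B1.2.2 by omega]

-- ===== VERDICT (by name: the statement is the Claim_ definition above) =====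
set_option maxHeartbeats 4000000 in
theorem recover_spell_slots_arcane_recovery_spec : Claim_equal_recover_spell_slots_arcane_recovery := by
  intro ss spd wl hdom hpre
  unfold Spec_recover_spell_slots_arcane_recovery
  unfold recover_spell_slots_arcane_recovery recover_spell_slots_arcane_recovery_alt
  have hrange : PySem.List.pyRange 8 0 (-1) = [8, 7, 6, 5, 4, 3, 2, 1] := by decide
  have hrep : (PySem.List.pyRepeat ([0] : List Int) 8) = [0, 0, 0, 0, 0, 0, 0, 0] := by decide
  rw [hrange, hrep]
  rw [fold_eq spd wl [8, 7, 6, 5, 4, 3, 2, 1] ss [0, 0, 0, 0, 0, 0, 0, 0] 0 (by omega)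
      (by decide) (by decide) (by decide)]
  rw [show wl - 0 = wl by omega]
  set r := [(8:Int), 7, 6, 5, 4, 3, 2, 1].foldl (fun st lv => pvLevelB spd lv st)
      (ss, ([0, 0, 0, 0, 0, 0, 0, 0] : List Int), wl) with hr
  simp only
  have hlen : r.2.1.length = 8 := by
    rw [hr, foldB_rec_length]; rfl
  clear_value r
  clear hr
  obtain ⟨ra, rb, rc⟩ := r
  simp only at hlen ⊢
  obtain ⟨c1, c2, c3, c4, c5, c6, c7, c8, hc⟩ :
      ∃ c1 c2 c3 c4 c5 c6 c7 c8, rb = [c1, c2, c3, c4, c5, c6, c7, c8] := by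
    rcases h21 : rb with _ | ⟨c1, _ | ⟨c2, _ | ⟨c3, _ | ⟨c4, _ | ⟨c5, _ | ⟨c6, _ | ⟨c7, _ | ⟨c8, t⟩⟩⟩⟩⟩⟩⟩⟩ <;>
      rw [h21] at hlen <;> simp at hlen
    exact ⟨c1, c2, c3, c4, c5, c6, c7, c8, by rw [hlen]⟩
  subst hc
  split_ifs with hcond
  · rfl
  · refine congrArg _ (congrArg _ ?_)
    congr 1
    congr 1
    congr 1
    rw [PySem.List.foldl_append_ite (p := fun q : Int × Int => 0 < q.2)
        (f := fun q : Int × Int => PySem.Int.toStr q.2 ++ " level " ++ PySem.Int.toStr (9 - q.1))]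
    have hE : PySem.List.enumerate ([c1, c2, c3, c4, c5, c6, c7, c8] : List Int).reverse 1
        = ([8, 7, 6, 5, 4, 3, 2, 1] : List Int).map
            (fun lv => (9 - lv, PySem.List.pyGetD [c1, c2, c3, c4, c5, c6, c7, c8] (lv - 1) 0)) := by
      norm_num [PySem.List.enumerate_cons, PySem.List.enumerate_nil, pysem]
      exact ⟨rfl, rfl, rfl, rfl, rfl, rfl⟩
    rw [hE, List.filter_map, List.map_map]
    simp only [List.nil_append, Function.comp_def]
    exact List.map_congr_left (fun x _ => by rw [show (9:Int) - (9 - x) = x by omega])
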